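-- pv_equiv track=rewrite | github.com/cpgeersen/Book-Tracker | app/services/filter_search_results.py | filter_results_isbn
-- ===== SOURCE A (Python) =====
-- def filter_results_isbn(filter_json, json_result):
--     # JSON from frontend filters
--     filter_json_dict = dict(filter_json)
--
--     # Boolean filters
--     filter_owned = filter_json_dict.get('owned')
--     filter_favorite = filter_json_dict.get('favorite')
--     filter_completed = filter_json_dict.get('completed')
--     filter_currently_reading = filter_json_dict.get('currently-reading')
--
--     # Filters that are not strings
--     filter_personal_or_academic = filter_json_dict.get('personal-or-academic', 'any')
--     filter_genre_1 = filter_json_dict.get('genre-1', 'any')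
--     filter_genre = str(filter_json_dict.get('genre', '')).split(',')[0]
--
--     json_result_dict = dict(json_result)
--
--
--     if filter_currently_reading == 'true':
--         if json_result_dict.get('Currently_Reading') != 'yes':
--             json_result_dict = {}
--             return json_result_dict
--
--     if filter_favorite == 'true':
--         if json_result_dict.get('Favorite') != 'yes':
--             json_result_dict = {}
--             return json_result_dict
--
--     if filter_owned == 'true':
--         if json_result_dict.get('Owned') != 'yes':
--             json_result_dict = {}
--             return json_result_dict
--
--     if filter_completed == 'true':
--         if json_result_dict.get('Completed') != 'yes':
--             json_result_dict = {}
--             return json_result_dict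
--
--
--     # These three break view all books need to fix
--     genre_num = 2
--     if filter_genre != '':
--         while genre_num < 5:
--             genre_value = json_result_dict.get(f'Genre_{genre_num}')
--
--             if genre_value == filter_genre:
--                 break
--
--             if genre_value is None:
--                 json_result_dict = {}
--                 return json_result_dict
--             elif genre_value != filter_genre:
--                 json_result_dict = {}
--                 return json_result_dict
--             genre_num += 1
--
--     if filter_genre_1 != 'any':
--         if json_result_dict.get('Genre_1') != filter_genre_1:
--             json_result_dict = {}
--             return json_result_dict
--
--     if filter_personal_or_academic != 'any':
--         if json_result_dict.get('Personal_Or_Academic') != filter_personal_or_academic: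
--             json_result_dict = {}
--             return json_result_dict
--
--
--     return json_result_dict
-- ===== SOURCE B (Python) =====
-- def filter_results_isbn(filter_json, json_result):
--     filter_json_dict = dict(filter_json)
--     json_result_dict = dict(json_result)
--
--     # Pass 1: compile the active filters into (result_key, required_value)
--     # constraints by iterating over the filters actually present.  A's
--     # while-loop over Genre_2..Genre_4 always decides on Genre_2, so the
--     # genre filter compiles to a single Genre_2 constraint.
--     bool_keys = {'currently-reading': 'Currently_Reading',
--                  'favorite': 'Favorite',
--                  'owned': 'Owned',
--                  'completed': 'Completed'}
--     constraints = []
--     for key, value in filter_json_dict.items():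
--         if key in bool_keys:
--             if value == 'true':
--                 constraints.append((bool_keys[key], 'yes'))
--         elif key == 'genre':
--             genre = str(value).split(',')[0]
--             if genre != '':
--                 constraints.append(('Genre_2', genre))
--         elif key == 'genre-1':
--             if value != 'any':
--                 constraints.append(('Genre_1', value))
--         elif key == 'personal-or-academic':
--             if value != 'any':
--                 constraints.append(('Personal_Or_Academic', value))
--
--     # Pass 2: the result survives iff it satisfies every compiled constraint.
--     if all(json_result_dict.get(rk) == rv for rk, rv in constraints):
--         return json_result_dict
--     return {}
-- ===== Notes on version B (the rewrite author's own statement) =====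
-- stated objective: alternative
-- what changed: B is a two-pass constraint compiler: it iterates over the filter dict's own entries once to build a list of (result_key, required_value) constraints (collapsing A's dead while-loop over Genre_2..Genre_4, which always decides on Genre_2, into a single Genre_2 constraint), then keeps the result iff one 'all' check over that constraint list succeeds, instead of A's fixed sequence of hard-coded guard lookups with early returns.
import Mathlib
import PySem

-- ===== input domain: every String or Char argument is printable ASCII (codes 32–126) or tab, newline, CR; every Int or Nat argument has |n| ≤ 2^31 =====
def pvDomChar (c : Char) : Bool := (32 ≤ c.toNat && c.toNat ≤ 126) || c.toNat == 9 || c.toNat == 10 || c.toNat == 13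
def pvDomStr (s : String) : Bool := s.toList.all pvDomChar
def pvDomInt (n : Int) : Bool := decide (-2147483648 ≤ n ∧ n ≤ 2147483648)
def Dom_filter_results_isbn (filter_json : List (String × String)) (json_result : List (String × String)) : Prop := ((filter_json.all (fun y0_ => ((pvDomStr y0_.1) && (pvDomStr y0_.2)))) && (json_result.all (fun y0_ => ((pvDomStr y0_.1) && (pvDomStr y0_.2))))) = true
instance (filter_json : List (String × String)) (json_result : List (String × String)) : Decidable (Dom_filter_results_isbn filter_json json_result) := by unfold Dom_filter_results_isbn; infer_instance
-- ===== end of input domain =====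

-- B compiles the filter dict's entries into a list of (result_key, required_value) constraints
-- (A's dead while-loop over Genre_2..Genre_4 always decides on Genre_2, so the genre filter
-- compiles to one Genre_2 constraint) and keeps the result iff one 'all' check over that list
-- succeeds, replacing A's fixed sequence of hard-coded guards with early returns (objective: alternative).

-- ===== PORT A =====
-- A's 'while genre_num < 5' loop: returns some [] where the Python returns {} from inside
-- the loop, none where it breaks or terminates (falling through to the later checks).
def pvGenreLoopA : Nat → Int → PySem.Dict String String → String → Option (List (String × String))
  | 0, _, _, _ => none
  | fuel+1, num, d, g =>
    if num < 5 then
      let gv := d.get? ("Genre_" ++ PySem.Int.toStr num)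
      if gv = some g then none
      else if gv = Option.none then some []
      else if gv ≠ some g then some []
      else pvGenreLoopA fuel (num + 1) d g
    else none

def filter_results_isbn (filter_json : List (String × String)) (json_result : List (String × String)) : List (String × String) :=
  let filter_json_dict := PySem.Dict.ofList filter_json
  let filter_owned := filter_json_dict.get? "owned"
  let filter_favorite := filter_json_dict.get? "favorite"
  let filter_completed := filter_json_dict.get? "completed"
  let filter_currently_reading := filter_json_dict.get? "currently-reading"
  let filter_personal_or_academic := filter_json_dict.getD "personal-or-academic" "any"
  let filter_genre_1 := filter_json_dict.getD "genre-1" "any"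
  let filter_genre := ((PySem.Str.split? (filter_json_dict.getD "genre" "") ",").getD []).headD ""
  let json_result_dict := PySem.Dict.ofList json_result
  if filter_currently_reading = some "true" ∧ json_result_dict.get? "Currently_Reading" ≠ some "yes" then []
  else if filter_favorite = some "true" ∧ json_result_dict.get? "Favorite" ≠ some "yes" then []
  else if filter_owned = some "true" ∧ json_result_dict.get? "Owned" ≠ some "yes" then []
  else if filter_completed = some "true" ∧ json_result_dict.get? "Completed" ≠ some "yes" then []
  else
    let rest :=
      if filter_genre_1 ≠ "any" ∧ json_result_dict.get? "Genre_1" ≠ some filter_genre_1 then []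
      else if filter_personal_or_academic ≠ "any" ∧ json_result_dict.get? "Personal_Or_Academic" ≠ some filter_personal_or_academic then []
      else json_result_dict.items
    if filter_genre ≠ "" then
      match pvGenreLoopA 5 2 json_result_dict filter_genre with
      | some ret => ret
      | Option.none => rest
    else rest

-- ===== PORT B =====
def pvBoolKeys : PySem.Dict String String :=
  PySem.Dict.ofList [("currently-reading", "Currently_Reading"), ("favorite", "Favorite"),
                     ("owned", "Owned"), ("completed", "Completed")]

-- the constraints one (key, value) entry of the filter dict contributes
def pvConstraint (kv : String × String) : List (String × String) :=
  match pvBoolKeys.get? kv.1 with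
  | some rk => if kv.2 == "true" then [(rk, "yes")] else []
  | Option.none =>
    if kv.1 == "genre" then
      let genre := ((PySem.Str.split? kv.2 ",").getD []).headD ""
      if genre ≠ "" then [("Genre_2", genre)] else []
    else if kv.1 == "genre-1" then
      if kv.2 ≠ "any" then [("Genre_1", kv.2)] else []
    else if kv.1 == "personal-or-academic" then
      if kv.2 ≠ "any" then [("Personal_Or_Academic", kv.2)] else []
    else []

def filter_results_isbn_alt (filter_json : List (String × String)) (json_result : List (String × String)) : List (String × String) :=
  let filter_json_dict := PySem.Dict.ofList filter_json
  let json_result_dict := PySem.Dict.ofList json_result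
  let constraints := filter_json_dict.items.foldl (fun acc kv => acc ++ pvConstraint kv) []
  if constraints.all (fun c => json_result_dict.get? c.1 == some c.2) then json_result_dict.items
  else []

-- ===== PRECONDITION & SPEC =====
def Spec_filter_results_isbn (filter_json : List (String × String)) (json_result : List (String × String)) (out : List (String × String)) : Prop := out = filter_results_isbn_alt filter_json json_result
instance (filter_json : List (String × String)) (json_result : List (String × String)) (out : List (String × String)) : Decidable (Spec_filter_results_isbn filter_json json_result out) := by unfold Spec_filter_results_isbn; infer_instance

-- ===== CLAIM (what is proved, stated in full; the proofs are below) =====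
def Claim_equal_filter_results_isbn : Prop := ∀ (filter_json : List (String × String)) (json_result : List (String × String)), Dom_filter_results_isbn filter_json json_result → Spec_filter_results_isbn filter_json json_result (filter_results_isbn filter_json json_result)

-- ===== LEMMAS AND PROOFS =====
-- the disjunction of A's failing guards, value-wise
abbrev pvFailsP (fd rd : PySem.Dict String String) : Prop :=
  (fd.get? "currently-reading" = some "true" ∧ rd.get? "Currently_Reading" ≠ some "yes") ∨
  (fd.get? "favorite" = some "true" ∧ rd.get? "Favorite" ≠ some "yes") ∨
  (fd.get? "owned" = some "true" ∧ rd.get? "Owned" ≠ some "yes") ∨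
  (fd.get? "completed" = some "true" ∧ rd.get? "Completed" ≠ some "yes") ∨
  (((PySem.Str.split? (fd.getD "genre" "") ",").getD []).headD "" ≠ "" ∧
     rd.get? "Genre_2" ≠ some (((PySem.Str.split? (fd.getD "genre" "") ",").getD []).headD "")) ∨
  (fd.getD "genre-1" "any" ≠ "any" ∧ rd.get? "Genre_1" ≠ some (fd.getD "genre-1" "any")) ∨
  (fd.getD "personal-or-academic" "any" ≠ "any" ∧
     rd.get? "Personal_Or_Academic" ≠ some (fd.getD "personal-or-academic" "any"))

def pvFails (fd rd : PySem.Dict String String) : Bool := decide (pvFailsP fd rd)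

theorem pv_get?_mk_nil (k : String) :
    (PySem.Dict.mk ([] : List (String × String))).get? k = none := rfl

theorem pvBK : pvBoolKeys = PySem.Dict.mk
    [("currently-reading", "Currently_Reading"), ("favorite", "Favorite"),
     ("owned", "Owned"), ("completed", "Completed")] := by decide

-- A's while-loop always decides on its first iteration (key Genre_2).
theorem pvGenreLoopA_two (d : PySem.Dict String String) (g : String) :
    pvGenreLoopA 5 2 d g = if d.get? "Genre_2" = some g then none else some [] := by
  have h2 : ("Genre_" ++ PySem.Int.toStr 2) = "Genre_2" := by decide
  by_cases h : d.get? "Genre_2" = some g <;> simp [pvGenreLoopA, h2, h]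


theorem pv_if_or2 {α : Type} (a b : Prop) [Decidable a] [Decidable b] (x y : α) :
    (if a then x else if b then x else y) = (if a ∨ b then x else y) := by
  split_ifs <;> tauto

theorem pv_genre_if (cg c2 : Prop) [Decidable cg] [Decidable c2] (rest : List (String × String)) :
    (if cg then (if c2 then rest else []) else rest) = if cg ∧ ¬ c2 then [] else rest := by
  split_ifs <;> tauto

-- the if chain of A, over abstract lookup results
theorem pvCoreA (o1 o2 o3 o4 r1 r2 r3 r4 r5 r6 r7 : Option String) (g g1 pa : String)
    (xs : List (String × String)) :
    (if o1 = some "true" ∧ r1 ≠ some "yes" then []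
     else if o2 = some "true" ∧ r2 ≠ some "yes" then []
     else if o3 = some "true" ∧ r3 ≠ some "yes" then []
     else if o4 = some "true" ∧ r4 ≠ some "yes" then []
     else if g ≠ "" then
       (if r5 = some g then
          (if g1 ≠ "any" ∧ r6 ≠ some g1 then []
           else if pa ≠ "any" ∧ r7 ≠ some pa then [] else xs)
        else [])
     else
       (if g1 ≠ "any" ∧ r6 ≠ some g1 then []
        else if pa ≠ "any" ∧ r7 ≠ some pa then [] else xs))
    = if decide ((o1 = some "true" ∧ r1 ≠ some "yes") ∨ (o2 = some "true" ∧ r2 ≠ some "yes") ∨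
        (o3 = some "true" ∧ r3 ≠ some "yes") ∨ (o4 = some "true" ∧ r4 ≠ some "yes") ∨
        (g ≠ "" ∧ r5 ≠ some g) ∨ (g1 ≠ "any" ∧ r6 ≠ some g1) ∨ (pa ≠ "any" ∧ r7 ≠ some pa))
      then [] else xs := by
  simp only [decide_eq_true_eq, pv_genre_if, pv_if_or2]

-- A's 'break' / return-{} choice inside the while-loop, as an if
theorem pv_match_if (c : Prop) [Decidable c] (rest : List (String × String)) :
    (match (if c then Option.none else some ([] : List (String × String))) with
     | some ret => ret
     | Option.none => rest) = if c then rest else [] := by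
  by_cases h : c <;> simp [h]

-- A's value is the one-shot test against pvFails.
theorem pvA_eq (filter_json json_result : List (String × String)) :
    filter_results_isbn filter_json json_result =
      if pvFails (PySem.Dict.ofList filter_json) (PySem.Dict.ofList json_result) then []
      else (PySem.Dict.ofList json_result).items := by
  unfold filter_results_isbn
  simp only [pvGenreLoopA_two, pv_match_if]
  exact pvCoreA
    ((PySem.Dict.ofList filter_json).get? "currently-reading")
    ((PySem.Dict.ofList filter_json).get? "favorite")
    ((PySem.Dict.ofList filter_json).get? "owned")
    ((PySem.Dict.ofList filter_json).get? "completed")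
    ((PySem.Dict.ofList json_result).get? "Currently_Reading")
    ((PySem.Dict.ofList json_result).get? "Favorite")
    ((PySem.Dict.ofList json_result).get? "Owned")
    ((PySem.Dict.ofList json_result).get? "Completed")
    ((PySem.Dict.ofList json_result).get? "Genre_2")
    ((PySem.Dict.ofList json_result).get? "Genre_1")
    ((PySem.Dict.ofList json_result).get? "Personal_Or_Academic")
    (((PySem.Str.split? ((PySem.Dict.ofList filter_json).getD "genre" "") ",").getD []).headD "")
    ((PySem.Dict.ofList filter_json).getD "genre-1" "any")
    ((PySem.Dict.ofList filter_json).getD "personal-or-academic" "any")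
    ((PySem.Dict.ofList json_result).items)

-- items.all over a nodup-keys dict is a ∀ over get?.
theorem pv_items_all_iff (d : PySem.Dict String String) (hn : d.keys.Nodup)
    (Q : String × String → Bool) :
    d.items.all Q = true ↔ ∀ k v, d.get? k = some v → Q (k, v) = true := by
  rw [List.all_eq_true]
  constructor
  · intro h k v hkv
    exact h _ (PySem.Dict.mem_items_of_get?_eq_some d hkv)
  · intro h p hp
    exact h p.1 p.2 (PySem.Dict.get?_of_mem_items d hp hn)

-- B's 'all' check succeeds exactly when no guard of A fails.
theorem pvAlt_all_iff (fd rd : PySem.Dict String String) (hn : fd.keys.Nodup) :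
    ((fd.items.flatMap pvConstraint).all (fun c => rd.get? c.1 == some c.2) = true) ↔
      ¬ pvFailsP fd rd := by
  rw [List.all_flatMap, pv_items_all_iff fd hn]
  unfold pvFailsP
  constructor
  · intro h
    push_neg
    refine ⟨?_, ?_, ?_, ?_, ?_, ?_, ?_⟩
    · intro hcr
      have := h _ _ hcr
      simpa [pvConstraint, pvBK, PySem.Dict.get?_mk_cons, pv_get?_mk_nil] using this
    · intro hcr
      have := h _ _ hcr
      simpa [pvConstraint, pvBK, PySem.Dict.get?_mk_cons, pv_get?_mk_nil] using this
    · intro hcr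
      have := h _ _ hcr
      simpa [pvConstraint, pvBK, PySem.Dict.get?_mk_cons, pv_get?_mk_nil] using this
    · intro hcr
      have := h _ _ hcr
      simpa [pvConstraint, pvBK, PySem.Dict.get?_mk_cons, pv_get?_mk_nil] using this
    · intro hg
      cases hv : fd.get? "genre" with
      | none =>
          exfalso
          rw [PySem.Dict.getD_of_get?_eq_none fd "" hv] at hg
          exact hg (by decide)
      | some v =>
          have := h _ _ hv
          rw [PySem.Dict.getD_of_get?_eq_some fd "" hv] at hg ⊢
          have hg' : ((PySem.Str.split? v ",").getD []).head?.getD "" ≠ "" := by simpa using hg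
          simpa [pvConstraint, pvBK, PySem.Dict.get?_mk_cons, pv_get?_mk_nil, hg'] using this
    · intro hg1
      cases hv : fd.get? "genre-1" with
      | none =>
          exact absurd (PySem.Dict.getD_of_get?_eq_none fd "any" hv) hg1
      | some v =>
          have := h _ _ hv
          rw [PySem.Dict.getD_of_get?_eq_some fd "any" hv] at hg1 ⊢
          simpa [pvConstraint, pvBK, PySem.Dict.get?_mk_cons, pv_get?_mk_nil, hg1] using this
    · intro hpa
      cases hv : fd.get? "personal-or-academic" with
      | none =>
          exact absurd (PySem.Dict.getD_of_get?_eq_none fd "any" hv) hpa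
      | some v =>
          have := h _ _ hv
          rw [PySem.Dict.getD_of_get?_eq_some fd "any" hv] at hpa ⊢
          simpa [pvConstraint, pvBK, PySem.Dict.get?_mk_cons, pv_get?_mk_nil, hpa] using this
  · intro h k v hkv
    push_neg at h
    obtain ⟨hcr, hfa, how, hco, hg, hg1, hpa⟩ := h
    by_cases e1 : k = "currently-reading"
    · subst e1
      by_cases ht : v = "true"
      · subst ht; simpa [pvConstraint, pvBK, PySem.Dict.get?_mk_cons, pv_get?_mk_nil] using hcr hkv
      · simp [pvConstraint, pvBK, PySem.Dict.get?_mk_cons, pv_get?_mk_nil, ht]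
    · by_cases e2 : k = "favorite"
      · subst e2
        by_cases ht : v = "true"
        · subst ht; simpa [pvConstraint, pvBK, PySem.Dict.get?_mk_cons, pv_get?_mk_nil] using hfa hkv
        · simp [pvConstraint, pvBK, PySem.Dict.get?_mk_cons, pv_get?_mk_nil, ht]
      · by_cases e3 : k = "owned"
        · subst e3
          by_cases ht : v = "true"
          · subst ht; simpa [pvConstraint, pvBK, PySem.Dict.get?_mk_cons, pv_get?_mk_nil] using how hkv
          · simp [pvConstraint, pvBK, PySem.Dict.get?_mk_cons, pv_get?_mk_nil, ht]
        · by_cases e4 : k = "completed"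
          · subst e4
            by_cases ht : v = "true"
            · subst ht; simpa [pvConstraint, pvBK, PySem.Dict.get?_mk_cons, pv_get?_mk_nil] using hco hkv
            · simp [pvConstraint, pvBK, PySem.Dict.get?_mk_cons, pv_get?_mk_nil, ht]
          · by_cases e5 : k = "genre"
            · subst e5
              rw [PySem.Dict.getD_of_get?_eq_some fd "" hkv] at hg
              by_cases hne : ((PySem.Str.split? v ",").getD []).headD "" ≠ ""
              · have hne' : ((PySem.Str.split? v ",").getD []).head?.getD "" ≠ "" := by simpa using hne
                simpa [pvConstraint, pvBK, PySem.Dict.get?_mk_cons, pv_get?_mk_nil, hne'] using hg hne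
              · have hne' : ((PySem.Str.split? v ",").getD []).head?.getD "" = "" := by simpa using hne
                simp [pvConstraint, pvBK, PySem.Dict.get?_mk_cons, pv_get?_mk_nil, hne']
            · by_cases e6 : k = "genre-1"
              · subst e6
                rw [PySem.Dict.getD_of_get?_eq_some fd "any" hkv] at hg1
                by_cases hne : v ≠ "any"
                · simpa [pvConstraint, pvBK, PySem.Dict.get?_mk_cons, pv_get?_mk_nil, hne] using hg1 hne
                · simp [pvConstraint, pvBK, PySem.Dict.get?_mk_cons, pv_get?_mk_nil, hne]
              · by_cases e7 : k = "personal-or-academic"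
                · subst e7
                  rw [PySem.Dict.getD_of_get?_eq_some fd "any" hkv] at hpa
                  by_cases hne : v ≠ "any"
                  · simpa [pvConstraint, pvBK, PySem.Dict.get?_mk_cons, pv_get?_mk_nil, hne] using hpa hne
                  · simp [pvConstraint, pvBK, PySem.Dict.get?_mk_cons, pv_get?_mk_nil, hne]
                · simp [pvConstraint, pvBK, PySem.Dict.get?_mk_cons, pv_get?_mk_nil, e1, e2, e3, e4, e5, e6, e7, Ne.symm e1, Ne.symm e2, Ne.symm e3, Ne.symm e4, Ne.symm e5]

theorem filter_results_isbn_eq (filter_json json_result : List (String × String)) :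
    filter_results_isbn filter_json json_result = filter_results_isbn_alt filter_json json_result := by
  rw [pvA_eq]
  unfold filter_results_isbn_alt
  simp only [PySem.List.foldl_append_eq_flatMap, List.nil_append]
  have hiff := pvAlt_all_iff (PySem.Dict.ofList filter_json) (PySem.Dict.ofList json_result)
    (PySem.Dict.nodup_keys_ofList filter_json)
  by_cases h : pvFailsP (PySem.Dict.ofList filter_json) (PySem.Dict.ofList json_result)
  · have hb : pvFails (PySem.Dict.ofList filter_json) (PySem.Dict.ofList json_result) = true :=
      decide_eq_true h
    rw [hb, if_pos rfl, if_neg (fun hc => (hiff.mp hc) h)]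
  · have hb : pvFails (PySem.Dict.ofList filter_json) (PySem.Dict.ofList json_result) = false :=
      decide_eq_false h
    rw [hb, if_neg (by simp), if_pos (hiff.mpr h)]

-- ===== VERDICT (by name: the statement is the Claim_ definition above) =====
theorem filter_results_isbn_spec : Claim_equal_filter_results_isbn := by
  intro fj jr _
  unfold Spec_filter_results_isbn
  exact filter_results_isbn_eq fj jr
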